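-- pv_equiv track=rewrite | github.com/Mi-Gumi/Algorithm-Study | 2023.02/2023.02.14/하수빈/퇴사.py | check
-- ===== SOURCE A (Python) =====
-- def check(schedule, start, N):
--     max_ssum = 0
--     # 시작점 부터 끝까지
--     for i in range(start, N):
--         ssum = 0
--         # 현재일에서 상담을 실행해도 N을 넘지 않는다면
--         if N >= i + schedule[i][0]:
--             # ssum은 현재일 상담보수 + 상담이 끝난날에서 다시 확인
--             ssum = schedule[i][1] + check(schedule, i + schedule[i][0], N)
--
--         if max_ssum < ssum:
--             max_ssum = ssum
--
--     return max_ssum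
-- ===== SOURCE B (Python) =====
-- def check(schedule, start, N):
--     # Bottom-up DP instead of A's exponential recursion: build the list
--     # best = [F(i), F(i+1), ..., F(N)] back to front, where F(i) is the best
--     # profit obtainable from day i on; F(i+t) sits at offset t-1 of the
--     # previous list.
--     best = [0]
--     for i in reversed(range(start, N)):
--         t = schedule[i][0]
--         cur = best[0]
--         if i + t <= N:
--             cand = schedule[i][1] + best[t - 1]
--             if cand > cur:
--                 cur = cand
--         best.insert(0, cur)
--     return best[0]
-- ===== Notes on version B (the rewrite author's own statement) =====
-- stated objective: faster
-- what changed: A recomputes overlapping subproblems by plain recursion (exponential in N-start); B fills a DP list best[i] = best profit from day i back to front in one pass, so each day is processed once.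
import Mathlib
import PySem

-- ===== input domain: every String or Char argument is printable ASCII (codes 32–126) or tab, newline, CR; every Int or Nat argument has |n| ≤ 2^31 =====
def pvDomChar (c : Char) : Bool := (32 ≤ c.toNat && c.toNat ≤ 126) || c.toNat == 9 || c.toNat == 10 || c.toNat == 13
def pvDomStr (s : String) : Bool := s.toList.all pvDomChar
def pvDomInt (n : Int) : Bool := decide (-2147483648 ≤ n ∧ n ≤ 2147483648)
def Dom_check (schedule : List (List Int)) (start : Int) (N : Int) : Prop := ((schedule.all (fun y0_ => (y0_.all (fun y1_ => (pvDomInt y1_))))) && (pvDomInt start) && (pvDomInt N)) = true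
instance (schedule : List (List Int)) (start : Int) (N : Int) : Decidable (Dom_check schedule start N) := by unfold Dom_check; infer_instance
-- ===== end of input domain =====

-- B replaces A's exponential overlapping recursion by a back-to-front DP over the days (objective: faster).

-- ===== PORT A =====
-- A is general recursion (its recursion is unbounded for non-positive durations,
-- where Python hits RecursionError); the port uses a fuel parameter that Pre_check
-- makes sufficient: fuel 0 is only reached outside Pre_check.
def checkFuel : Nat → List (List Int) → Int → Int → Int
  | 0, _, _, _ => 0
  | fuel+1, schedule, start, N =>
    (PySem.List.pyRange start N 1).foldl (fun max_ssum i =>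
      match PySem.List.pyGet? schedule i with
      | none => max_ssum            -- Python: IndexError (outside Pre_check)
      | some row =>
        match PySem.List.pyGet? row 0 with
        | none => max_ssum          -- Python: IndexError (outside Pre_check)
        | some d =>
          let ssum : Int :=
            if N ≥ i + d then
              (PySem.List.pyGet? row 1).getD 0 + checkFuel fuel schedule (i + d) N
            else 0
          if max_ssum < ssum then ssum else max_ssum) 0

def check (schedule : List (List Int)) (start : Int) (N : Int) : Int :=
  checkFuel ((N - start).toNat + 1) schedule start N

-- ===== PORT B =====
-- the loop body of Source B, named so the proofs can speak about it
def stepB (schedule : List (List Int)) (N : Int) (best : List Int) (i : Int) : List Int :=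
  let t := (PySem.List.pyGet? ((PySem.List.pyGet? schedule i).getD []) 0).getD 0
  let cur := (PySem.List.pyGet? best 0).getD 0
  let cur :=
    if i + t ≤ N then
      let cand := (PySem.List.pyGet? ((PySem.List.pyGet? schedule i).getD []) 1).getD 0
                    + (PySem.List.pyGet? best (t - 1)).getD 0
      if cand > cur then cand else cur
    else cur
  cur :: best

def check_alt (schedule : List (List Int)) (start : Int) (N : Int) : Int :=
  let best := ((PySem.List.pyRange start N 1).reverse).foldl (stepB schedule N) [0]
  (PySem.List.pyGet? best 0).getD 0

-- ===== PRECONDITION & SPEC =====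
def rowAt (schedule : List (List Int)) (i : Int) : List Int :=
  (PySem.List.pyGet? schedule i).getD []
def durAt (schedule : List (List Int)) (i : Int) : Int :=
  (PySem.List.pyGet? (rowAt schedule i) 0).getD 0
-- Pre_check excludes exactly the inputs on which A raises: an IndexError from a
-- visited day outside the schedule or a too-short row, or unbounded recursion
-- (RecursionError) when a visited duration is ≤ 0.
def Cond_check (schedule : List (List Int)) (N i : Int) : Prop :=
  (PySem.List.pyGet? schedule i).isSome = true ∧
  (PySem.List.pyGet? (rowAt schedule i) 0).isSome = true ∧
  1 ≤ durAt schedule i ∧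
  (i + durAt schedule i ≤ N → (PySem.List.pyGet? (rowAt schedule i) 1).isSome = true)
-- the two bounds only keep the quantifier's range small (they are implied by
-- Cond_check at the range's endpoints, so they exclude nothing extra)
def Pre_check (schedule : List (List Int)) (start : Int) (N : Int) : Prop :=
  N ≤ start ∨
    (-(schedule.length : Int) ≤ start ∧ N ≤ (schedule.length : Int) ∧
      ∀ i ∈ PySem.List.pyRange start N 1, Cond_check schedule N i)
instance (schedule : List (List Int)) (start : Int) (N : Int) : Decidable (Pre_check schedule start N) := by
  unfold Pre_check Cond_check; infer_instance
def pvWitness_check : List (List Int) × Int × Int := ([[1, 5], [2, 3], [1, 4]], 0, 3)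
def Spec_check (schedule : List (List Int)) (start : Int) (N : Int) (out : Int) : Prop := out = check_alt schedule start N
instance (schedule : List (List Int)) (start : Int) (N : Int) (out : Int) : Decidable (Spec_check schedule start N out) := by unfold Spec_check; infer_instance

-- ===== CLAIM (what is proved, stated in full; the proofs are below) =====
def Claim_equal_check : Prop := ∀ (schedule : List (List Int)) (start : Int) (N : Int), Dom_check schedule start N → Pre_check schedule start N → Spec_check schedule start N (check schedule start N)

-- ===== LEMMAS AND PROOFS =====

-- the mathematical value both programs compute: best profit from day i on
def F (schedule : List (List Int)) (N : Int) (i : Int) : Int :=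
  if h : i < N then
    let cand : Int :=
      if _hd : 1 ≤ durAt schedule i ∧ i + durAt schedule i ≤ N then
        (PySem.List.pyGet? (rowAt schedule i) 1).getD 0 + F schedule N (i + durAt schedule i)
      else 0
    max (F schedule N (i + 1)) cand
  else 0
termination_by (N - i).toNat
decreasing_by all_goals omega

theorem F_of_ge (s : List (List Int)) (N i : Int) (h : N ≤ i) : F s N i = 0 := by
  rw [F]; rw [dif_neg (by omega)]

theorem F_nonneg (s : List (List Int)) (N i : Int) : 0 ≤ F s N i := by
  rw [F]
  split
  · exact le_trans (F_nonneg s N (i + 1)) (le_max_left _ _)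
  · exact le_refl 0
termination_by (N - i).toNat
decreasing_by omega

theorem F_succ (s : List (List Int)) (N i : Int) (h : i < N) (hd1 : 1 ≤ durAt s i) :
    F s N i = max (F s N (i + 1))
      (if i + durAt s i ≤ N then
        (PySem.List.pyGet? (rowAt s i) 1).getD 0 + F s N (i + durAt s i) else 0) := by
  rw [F]; rw [dif_pos h]
  by_cases feas : i + durAt s i ≤ N
  · rw [dif_pos ⟨hd1, feas⟩, if_pos feas]
  · rw [dif_neg (fun hc => feas hc.2), if_neg feas]

-- the loop body of A at a given fuel
def stepA (fuel : Nat) (schedule : List (List Int)) (N : Int) (max_ssum i : Int) : Int :=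
  match PySem.List.pyGet? schedule i with
  | none => max_ssum
  | some row =>
    match PySem.List.pyGet? row 0 with
    | none => max_ssum
    | some d =>
      let ssum : Int :=
        if N ≥ i + d then
          (PySem.List.pyGet? row 1).getD 0 + checkFuel fuel schedule (i + d) N
        else 0
      if max_ssum < ssum then ssum else max_ssum

theorem checkFuel_succ (fuel : Nat) (s : List (List Int)) (a N : Int) :
    checkFuel (fuel + 1) s a N = (PySem.List.pyRange a N 1).foldl (stepA fuel s N) 0 := rfl

theorem stepA_ge (f : Nat) (s : List (List Int)) (N c i : Int) : c ≤ stepA f s N c i := by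
  unfold stepA
  split
  · exact le_refl c
  · split
    · exact le_refl c
    · dsimp only; split <;> omega

theorem stepA_max (f : Nat) (s : List (List Int)) (N c i : Int) (hc : 0 ≤ c) :
    stepA f s N c i = max c (stepA f s N 0 i) := by
  unfold stepA
  split
  · omega
  · split
    · omega
    · dsimp only; split_ifs <;> omega

theorem foldl_stepA_init (f : Nat) (s : List (List Int)) (N : Int) :
    ∀ (l : List Int) (c : Int), 0 ≤ c →
      l.foldl (stepA f s N) c = max c (l.foldl (stepA f s N) 0) := by
  intro l
  induction l with
  | nil => intro c hc; simp; omega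
  | cons a l ih =>
    intro c hc
    have h0a : 0 ≤ stepA f s N 0 a := stepA_ge f s N 0 a
    have hca : 0 ≤ stepA f s N c a := le_trans hc (stepA_ge f s N c a)
    simp only [List.foldl_cons]
    rw [ih _ hca, ih _ h0a, stepA_max f s N c a hc, max_assoc]

theorem checkFuel_eq_F (s : List (List Int)) (N start : Int) (fuel : Nat)
    (hf : (N - start).toNat < fuel)
    (hC : ∀ i ∈ PySem.List.pyRange start N 1, Cond_check s N i) :
    checkFuel fuel s start N = F s N start := by
  obtain ⟨f, rfl⟩ : ∃ f, fuel = f + 1 := ⟨fuel - 1, by omega⟩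
  by_cases h : start < N
  · rw [checkFuel_succ, PySem.List.pyRange_one_cons h, List.foldl_cons]
    have h0 : (0 : Int) ≤ stepA f s N 0 start := stepA_ge f s N 0 start
    rw [foldl_stepA_init f s N _ _ h0]
    have htail : (PySem.List.pyRange (start + 1) N 1).foldl (stepA f s N) 0 = F s N (start + 1) := by
      rw [← checkFuel_succ]
      exact checkFuel_eq_F s N (start + 1) (f + 1) (by omega)
        (fun i hi => hC i (by
          rw [PySem.List.mem_pyRange_one] at hi ⊢; omega))
    rw [htail]
    obtain ⟨hrs, hr0, hd1, -⟩ := hC start (by rw [PySem.List.mem_pyRange_one]; omega)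
    obtain ⟨row, hrow⟩ := Option.isSome_iff_exists.mp hrs
    have hrowAt : rowAt s start = row := by unfold rowAt; rw [hrow]; rfl
    rw [hrowAt] at hr0
    obtain ⟨d, hd⟩ := Option.isSome_iff_exists.mp hr0
    have hdur : durAt s start = d := by unfold durAt; rw [hrowAt, hd]; rfl
    rw [hdur] at hd1
    conv_rhs => rw [F_succ s N start h (by rw [hdur]; exact hd1)]
    rw [hdur, hrowAt]
    have hFpos : 0 ≤ F s N (start + 1) := F_nonneg s N (start + 1)
    simp only [stepA, hrow, hd]
    by_cases feas : start + d ≤ N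
    · have hrec : checkFuel f s (start + d) N = F s N (start + d) := by
        refine checkFuel_eq_F s N (start + d) f (by omega)
          (fun i hi => hC i (by rw [PySem.List.mem_pyRange_one] at hi ⊢; omega))
      rw [if_pos (show N ≥ start + d from feas), if_pos feas, hrec]
      split <;> omega
    · rw [if_neg (show ¬ N ≥ start + d from feas), if_neg feas]
      omega
  · rw [checkFuel_succ, PySem.List.pyRange_one_eq_nil (by omega), List.foldl_nil,
      F_of_ge s N start (by omega)]
termination_by (N - start).toNat
decreasing_by all_goals omega

-- indexing into B's DP list: entry j holds the profit from day a + j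
theorem pyGet?_mapF (s : List (List Int)) (N a j : Int) (h0 : 0 ≤ j) (h1 : j ≤ N - a) :
    PySem.List.pyGet? ((PySem.List.pyRange a N 1).map (F s N) ++ [0]) j
      = some (F s N (a + j)) := by
  rw [PySem.List.pyGet?_of_nonneg _ h0]
  by_cases hj : j < N - a
  · rw [List.getElem?_append_left
      (by rw [List.length_map, PySem.List.length_pyRange_one]; omega)]
    rw [List.getElem?_map]
    have hg : (PySem.List.pyRange a N 1)[j.toNat]? = some (a + (j.toNat : Int)) := by
      rw [List.getElem?_eq_getElem (by rw [PySem.List.length_pyRange_one]; omega)]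
      rw [PySem.List.getElem_pyRange_one]
    rw [hg]
    simp only [Option.map_some]
    congr 1
    congr 1
    omega
  · have hj' : j = N - a := by omega
    rw [List.getElem?_append_right
      (by rw [List.length_map, PySem.List.length_pyRange_one]; omega)]
    have hix : j.toNat - ((PySem.List.pyRange a N 1).map (F s N)).length = 0 := by
      rw [List.length_map, PySem.List.length_pyRange_one]; omega
    rw [hix]
    rw [F_of_ge s N (a + j) (by omega)]
    rfl

theorem foldr_stepB (s : List (List Int)) (N : Int) :
    ∀ (start : Int), (∀ i ∈ PySem.List.pyRange start N 1, Cond_check s N i) →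
      (PySem.List.pyRange start N 1).foldr (fun i best => stepB s N best i) [0]
        = (PySem.List.pyRange start N 1).map (F s N) ++ [0] := by
  intro start hC
  by_cases h : start < N
  · rw [PySem.List.pyRange_one_cons h]
    simp only [List.foldr_cons, List.map_cons, List.cons_append]
    rw [foldr_stepB s N (start + 1)
      (fun i hi => hC i (by rw [PySem.List.mem_pyRange_one] at hi ⊢; omega))]
    obtain ⟨-, -, hd1, -⟩ := hC start (by rw [PySem.List.mem_pyRange_one]; omega)
    have hFpos : 0 ≤ F s N (start + 1) := F_nonneg s N (start + 1)
    have hcur : (PySem.List.pyGet?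
        ((PySem.List.pyRange (start + 1) N 1).map (F s N) ++ [0]) 0).getD 0
        = F s N (start + 1) := by
      rw [pyGet?_mapF s N (start + 1) 0 (le_refl 0) (by omega)]
      simp
    conv_rhs => rw [F_succ s N start h hd1]
    unfold stepB
    dsimp only
    simp only [durAt, rowAt] at hd1 ⊢
    set t := (PySem.List.pyGet? ((PySem.List.pyGet? s start).getD []) 0).getD 0 with ht
    rw [hcur]
    by_cases feas : start + t ≤ N
    · rw [if_pos feas, if_pos feas]
      have hidx : (PySem.List.pyGet?
          ((PySem.List.pyRange (start + 1) N 1).map (F s N) ++ [0])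
          (t - 1)).getD 0 = F s N (start + t) := by
        rw [pyGet?_mapF s N (start + 1) (t - 1) (by omega) (by omega)]
        rw [show start + 1 + (t - 1) = start + t by omega]
        rfl
      rw [hidx]
      congr 1
      split <;> omega
    · rw [if_neg feas, if_neg feas]
      congr 1
      omega
  · rw [PySem.List.pyRange_one_eq_nil (by omega)]
    simp
termination_by start => (N - start).toNat
decreasing_by omega

-- ===== VERDICT (by name: the statement is the Claim_ definition above) =====
theorem check_spec : Claim_equal_check := by
  intro s start N _ hPre
  unfold Pre_check at hPre
  have hC : ∀ i ∈ PySem.List.pyRange start N 1, Cond_check s N i := by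
    rcases hPre with hns | ⟨-, -, hC⟩
    · intro i hi; rw [PySem.List.mem_pyRange_one] at hi; omega
    · exact hC
  unfold Spec_check check check_alt
  dsimp only
  rw [checkFuel_eq_F s N start _ (by omega) hC]
  rw [List.foldl_reverse]
  rw [foldr_stepB s N start hC]
  by_cases h : start ≤ N
  · rw [pyGet?_mapF s N start 0 (le_refl 0) (by omega)]
    simp
  · rw [PySem.List.pyRange_one_eq_nil (by omega), F_of_ge s N start (by omega)]
    rfl
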